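-- pv_equiv track=rewrite | github.com/ryankimjh00/LogPatternFinder | Pattern/crumbs/python/lcp&sufficx.py | find_all_repeating_patterns
-- ===== SOURCE A (Python) =====
-- def suffix_array(string):
--     suffixes = [(string[i:], i) for i in range(len(string))]
--     suffixes.sort()
--     return [suffix[1] for suffix in suffixes]
--
-- def lcp_array(string, suffix_array):
--     n = len(string)
--     lcp = [0] * n
--     rank = [0] * n
--     for i, suffix in enumerate(suffix_array):
--         rank[suffix] = i
--     k = 0
--     for i in range(n):
--         if rank[i] == n - 1:
--             k = 0
--             continue
--         j = suffix_array[rank[i] + 1]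
--         while i + k < n and j + k < n and string[i + k] == string[j + k]:
--             k += 1
--         lcp[rank[i]] = k
--         if k > 0:
--             k -= 1
--     return lcp
--
-- def find_all_repeating_patterns(string):
--     suffix_arr = suffix_array(string)
--     lcp_arr = lcp_array(string, suffix_arr)
--     patterns = []
--     for i, length in enumerate(lcp_arr):
--         if length > 0:
--             patterns.append(string[suffix_arr[i]: suffix_arr[i] + length])
--     return patterns
-- ===== SOURCE B (Python) =====
-- def _common_prefix(a, b):
--     p = []
--     for x, y in zip(a, b):
--         if x != y:
--             break
--         p.append(x)
--     return ''.join(p)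
--
-- def find_all_repeating_patterns(string):
--     sufs = sorted(string[i:] for i in range(len(string)))
--     return [p for p in map(_common_prefix, sufs, sufs[1:]) if p]
-- ===== Notes on version B (the rewrite author's own statement) =====
-- stated objective: simpler
-- what changed: B drops the suffix-array/rank/Kasai machinery entirely: it sorts the suffix strings and emits the nonempty common prefix of each adjacent sorted pair directly, which is exactly what A's lcp entries denote.
import Mathlib
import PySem

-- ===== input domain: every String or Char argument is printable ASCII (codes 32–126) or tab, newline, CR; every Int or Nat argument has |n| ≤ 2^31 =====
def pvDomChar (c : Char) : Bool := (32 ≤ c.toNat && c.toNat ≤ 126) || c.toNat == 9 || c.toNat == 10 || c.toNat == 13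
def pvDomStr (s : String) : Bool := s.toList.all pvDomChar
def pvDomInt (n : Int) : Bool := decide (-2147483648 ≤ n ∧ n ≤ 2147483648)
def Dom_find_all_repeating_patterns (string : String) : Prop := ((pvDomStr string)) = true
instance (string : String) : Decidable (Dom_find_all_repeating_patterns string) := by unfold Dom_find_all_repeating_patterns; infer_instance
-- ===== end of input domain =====

-- B replaces A's suffix-array/rank/Kasai pipeline by sorting the suffixes and emitting the
-- nonempty common prefix of each adjacent sorted pair directly (simpler, same asymptotics).

-- ===== PORT A =====
-- suffix_array(string): sort the (suffix, start-index) pairs (Python tuple order), keep the indices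
def pvSuffixArray (string : String) : List Int :=
  let suffixes : List (String × Int) :=
    (PySem.List.pyRange 0 (PySem.Str.len string) 1).map
      (fun i => (PySem.Str.slice string (some i) none, i))
  let sortedSuffixes := PySem.List.sorted2 suffixes (fun p => p.1) (fun p => p.2)
  sortedSuffixes.map (fun p => p.2)

-- the while-loop of lcp_array: extend k while string[i+k] == string[j+k];
-- i, j index into the string and are nonnegative here (i from range(n), j from suffix_array,
-- which holds exactly the values 0..n-1), so Nat indices and getD are exact
def pvLcpExtend (s : List Char) (i j : Nat) (k : Nat) : Nat :=
  if h : i + k < s.length ∧ j + k < s.length ∧ s.getD (i+k) ' ' = s.getD (j+k) ' '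
  then pvLcpExtend s i j (k+1) else k
termination_by s.length - k
decreasing_by obtain ⟨h1, -, -⟩ := h; omega

def pvLcpArray (string : String) (suffix_array : List Int) : List Int :=
  let s := string.toList
  let n := s.length
  let lcp : List Int := List.replicate n 0
  let rank : List Int := List.replicate n 0
  let rank := (PySem.List.enumerate suffix_array 0).foldl
      (fun r p => PySem.List.pySetD r p.2 p.1) rank
  let st := (List.range n).foldl
      (fun (st : List Int × Nat) (i : Nat) =>
        if PySem.List.pyGetD rank (i : Int) 0 = (n : Int) - 1 then (st.1, 0)
        else
          -- j = suffix_array[rank[i] + 1] is one of the indices 0..n-1, so toNat is exact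
          let j := PySem.List.pyGetD suffix_array (PySem.List.pyGetD rank (i : Int) 0 + 1) 0
          let k := pvLcpExtend s i j.toNat st.2
          (PySem.List.pySetD st.1 (PySem.List.pyGetD rank (i : Int) 0) (k : Int),
           if k > 0 then k - 1 else k))
      (lcp, 0)
  st.1

def find_all_repeating_patterns (string : String) : List String :=
  let suffix_arr := pvSuffixArray string
  let lcp_arr := pvLcpArray string suffix_arr
  (PySem.List.enumerate lcp_arr 0).foldl
    (fun patterns p =>
      if p.2 > 0 then
        patterns ++ [PySem.Str.slice string
          (some (PySem.List.pyGetD suffix_arr p.1 0))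
          (some (PySem.List.pyGetD suffix_arr p.1 0 + p.2))]
      else patterns) []

-- ===== PORT B =====
-- _common_prefix: walk the zipped pair, stop at the first mismatch, join the collected chars
def pvCommonPrefixChars : List (Char × Char) → List Char
  | [] => []
  | p :: r => if p.1 ≠ p.2 then [] else p.1 :: pvCommonPrefixChars r

def pvCommonPrefix (a b : String) : String :=
  String.ofList (pvCommonPrefixChars (a.toList.zip b.toList))

def find_all_repeating_patterns_alt (string : String) : List String :=
  let sufs := PySem.List.sorted
    ((PySem.List.pyRange 0 (PySem.Str.len string) 1).map
      (fun i => PySem.Str.slice string (some i) none)) (fun x => x)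
  ((sufs.zip (PySem.List.slice sufs (some 1) none)).map
      (fun p => pvCommonPrefix p.1 p.2)).filter (fun p => decide (p ≠ ""))

-- ===== PRECONDITION & SPEC =====
def Spec_find_all_repeating_patterns (string : String) (out : List String) : Prop := out = find_all_repeating_patterns_alt string
instance (string : String) (out : List String) : Decidable (Spec_find_all_repeating_patterns string out) := by unfold Spec_find_all_repeating_patterns; infer_instance

-- ===== CLAIM (what is proved, stated in full; the proofs are below) =====
def Claim_equal_find_all_repeating_patterns : Prop := ∀ (string : String), Dom_find_all_repeating_patterns string → Spec_find_all_repeating_patterns string (find_all_repeating_patterns string)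

-- ===== LEMMAS AND PROOFS =====

-- length of the common prefix of two character lists
def pvCpl (a b : List Char) : Nat := (pvCommonPrefixChars (a.zip b)).length

-- the sorted list of suffixes (exactly B's `sufs`)
def pvNS (string : String) : List String :=
  PySem.List.sorted
    ((PySem.List.pyRange 0 (PySem.Str.len string) 1).map
      (fun i => PySem.Str.slice string (some i) none)) (fun x => x)

-- start index of each sorted suffix, recovered from its length
def pvQ (string : String) : List Nat :=
  (pvNS string).map (fun t => string.toList.length - t.toList.length)

-- rank of text position i = position of suffix i in the sorted order
def pvRk (string : String) (i : Nat) : Nat := (pvQ string).idxOf i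
-- ===== common-prefix lemmas =====
theorem pvCp_cons (x y : Char) (a b : List Char) :
    pvCommonPrefixChars (List.zip (x::a) (y::b)) =
      if x = y then x :: pvCommonPrefixChars (List.zip a b) else [] := by
  by_cases h : x = y <;> simp [List.zip, pvCommonPrefixChars, h]

theorem pvCp_prefix_left (a b : List Char) : pvCommonPrefixChars (List.zip a b) <+: a := by
  induction a generalizing b with
  | nil => simp [pvCommonPrefixChars]
  | cons x a ih =>
    cases b with
    | nil => simp [pvCommonPrefixChars]
    | cons y b =>
      rw [pvCp_cons]
      by_cases h : x = y
      · rw [if_pos h]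
        exact List.cons_prefix_cons.mpr ⟨rfl, ih b⟩
      · simp [h]

theorem pvCp_prefix_right (a b : List Char) : pvCommonPrefixChars (List.zip a b) <+: b := by
  induction a generalizing b with
  | nil => simp [pvCommonPrefixChars]
  | cons x a ih =>
    cases b with
    | nil => simp [pvCommonPrefixChars]
    | cons y b =>
      rw [pvCp_cons]
      by_cases h : x = y
      · subst h
        rw [if_pos rfl]
        exact List.cons_prefix_cons.mpr ⟨rfl, ih b⟩
      · simp [h]

theorem pvCpl_le_left (a b : List Char) : pvCpl a b ≤ a.length :=
  (pvCp_prefix_left a b).length_le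

theorem pvCpl_le_right (a b : List Char) : pvCpl a b ≤ b.length :=
  (pvCp_prefix_right a b).length_le

theorem pvCp_eq_take (a b : List Char) :
    pvCommonPrefixChars (List.zip a b) = a.take (pvCpl a b) :=
  List.prefix_iff_eq_take.mp (pvCp_prefix_left a b)

theorem pvCpl_cons (x y : Char) (a b : List Char) :
    pvCpl (x::a) (y::b) = if x = y then pvCpl a b + 1 else 0 := by
  unfold pvCpl
  rw [pvCp_cons]
  by_cases h : x = y <;> simp [h]

theorem pvCp_getD_eq (a b : List Char) (r : Nat) (d : Char) (h : r < pvCpl a b) :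
    a.getD r d = b.getD r d := by
  induction a generalizing b r with
  | nil => simp [pvCpl, pvCommonPrefixChars] at h
  | cons x a ih =>
    cases b with
    | nil => simp [pvCpl, pvCommonPrefixChars] at h
    | cons y b =>
      rw [pvCpl_cons] at h
      by_cases hxy : x = y
      · rw [if_pos hxy] at h
        cases r with
        | zero => simpa using hxy
        | succ r => simpa using ih b r (by omega)
      · simp [hxy] at h

theorem pvCpl_lt_of (a b : List Char) (k : Nat) (d : Char)
    (hk : k ≤ pvCpl a b) (ha : k < a.length) (hb : k < b.length)
    (he : a.getD k d = b.getD k d) : k < pvCpl a b := by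
  induction a generalizing b k with
  | nil => simp at ha
  | cons x a ih =>
    cases b with
    | nil => simp at hb
    | cons y b =>
      rw [pvCpl_cons]
      cases k with
      | zero =>
        simp at he
        simp [he]
      | succ k =>
        rw [pvCpl_cons] at hk
        by_cases hxy : x = y
        · rw [if_pos hxy] at hk ⊢
          have := ih b k (by omega) (by simpa using ha) (by simpa using hb) (by simpa using he)
          omega
        · rw [if_neg hxy] at hk; omega

theorem pvCp_longest (a b p : List Char) (hpa : p <+: a) (hpb : p <+: b) :
    p <+: pvCommonPrefixChars (List.zip a b) := by
  induction p generalizing a b with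
  | nil => simp
  | cons x p ih =>
    obtain ⟨ta, rfl⟩ := hpa
    obtain ⟨tb, hb⟩ := hpb
    cases b with
    | nil => simp at hb
    | cons y b =>
      simp at hb
      obtain ⟨rfl, hb⟩ := hb
      rw [List.cons_append, pvCp_cons x x (p ++ ta) b, if_pos rfl]
      exact List.cons_prefix_cons.mpr ⟨rfl, ih (p ++ ta) b ⟨ta, rfl⟩ ⟨tb, hb⟩⟩
-- ===== order / sandwich lemmas =====
theorem pvGetD_drop (l : List Char) (i k : Nat) (d : Char) :
    (l.drop i).getD k d = l.getD (i+k) d := by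
  simp [List.getD, Nat.add_comm i k]

theorem pvCpl_self (a : List Char) : pvCpl a a = a.length := by
  refine Nat.le_antisymm (pvCpl_le_left a a) ?_
  simpa using (pvCp_longest a a a List.prefix_rfl List.prefix_rfl).length_le

theorem pvSandwichPrefixLt (p a b c : List Char) (hab : a < b) (hbc : b < c)
    (hpa : p <+: a) (hpc : p <+: c) : p <+: b := by
  induction p generalizing a b c with
  | nil => simp
  | cons x p ih =>
    obtain ⟨ta, rfl⟩ := hpa
    obtain ⟨tc, rfl⟩ := hpc
    cases b with
    | nil => exact absurd hab (List.not_lt_nil _)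
    | cons y b =>
      rw [List.cons_append] at hab hbc
      rcases List.cons_lt_cons_iff.mp hab with h1 | ⟨rfl, h1⟩
      · rcases List.cons_lt_cons_iff.mp hbc with h2 | ⟨rfl, h2⟩
        · exact absurd h1 (lt_asymm h2)
        · exact absurd h1 (lt_irrefl _)
      · rcases List.cons_lt_cons_iff.mp hbc with h2 | ⟨he, h2⟩
        · exact absurd h2 (lt_irrefl _)
        · exact List.cons_prefix_cons.mpr ⟨rfl, ih _ _ _ h1 h2 ⟨ta, rfl⟩ ⟨tc, rfl⟩⟩

theorem pvSandwichCpl (a b c : List Char) (hab : a ≤ b) (hbc : b ≤ c) :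
    pvCpl a c ≤ pvCpl a b := by
  rcases lt_or_eq_of_le hab with hab | rfl
  · rcases lt_or_eq_of_le hbc with hbc | rfl
    · have hp := pvSandwichPrefixLt (pvCommonPrefixChars (a.zip c)) a b c hab hbc
        (pvCp_prefix_left a c) (pvCp_prefix_right a c)
      simpa [pvCpl] using (pvCp_longest a b _ (pvCp_prefix_left a c) hp).length_le
    · exact le_rfl
  · rw [pvCpl_self]; exact pvCpl_le_left a c
-- ===== sorted-suffix-list (pvNS) and start-index (pvQ) facts =====
theorem pvToList_slice_from (s : String) (i : Nat) :
    (PySem.Str.slice s (some (i:Int)) none).toList = s.toList.drop i := by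
  simp [pysem]

theorem pvNS_eq (s : String) :
    pvNS s = PySem.List.sorted
      ((List.range s.toList.length).map
        (fun (i : Nat) => PySem.Str.slice s (some (i:Int)) none)) (fun x => x) := by
  unfold pvNS
  rw [PySem.Str.len_eq, PySem.List.pyRange_zero_nat, List.map_map]
  rfl

theorem pvSliceU_nodup (s : String) :
    ((List.range s.toList.length).map
      (fun (i : Nat) => PySem.Str.slice s (some (i:Int)) none)).Nodup := by
  refine (List.nodup_map_iff_inj_on (List.nodup_range)).mpr ?_
  intro x hx y hy hxy
  simp only [List.mem_range] at hx hy
  have := congrArg (fun t => t.toList.length) hxy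
  simp only [pvToList_slice_from, List.length_drop] at this
  omega

theorem pvNS_perm (s : String) :
    (pvNS s).Perm ((List.range s.toList.length).map
      (fun (i : Nat) => PySem.Str.slice s (some (i:Int)) none)) := by
  rw [pvNS_eq]; exact PySem.List.sorted_perm _ _ _

theorem pvNS_length (s : String) : (pvNS s).length = s.toList.length := by
  simpa using (pvNS_perm s).length_eq

theorem pvNS_nodup (s : String) : (pvNS s).Nodup :=
  ((pvNS_perm s).nodup_iff).mpr (pvSliceU_nodup s)

theorem pvNS_pairwise_lt (s : String) : (pvNS s).Pairwise (· < ·) := by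
  have h1 : (pvNS s).Pairwise (· ≤ ·) := by
    rw [pvNS_eq]; exact PySem.List.sorted_pairwise _ _
  exact ((h1.and (pvNS_nodup s)).imp (fun h => lt_of_le_of_ne h.1 h.2))

theorem pvNS_mem (s : String) (x : String) (hx : x ∈ pvNS s) :
    ∃ i < s.toList.length, x = PySem.Str.slice s (some (i:Int)) none := by
  have := (pvNS_perm s).mem_iff.mp hx
  simp only [List.mem_map, List.mem_range] at this
  obtain ⟨i, hi, rfl⟩ := this
  exact ⟨i, hi, rfl⟩

theorem pvQ_length (s : String) : (pvQ s).length = s.toList.length := by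
  simp only [pvQ, List.length_map, pvNS_length]

theorem pvQ_getElem (s : String) (t : Nat) (ht : t < (pvQ s).length) :
    s.toList.drop ((pvQ s)[t]) = ((pvNS s)[t]'(by simpa only [pvQ, List.length_map] using ht)).toList ∧
      ((pvQ s)[t] < s.toList.length ∨ s.toList.length = 0) := by
  have htn : t < (pvNS s).length := by simpa only [pvQ, List.length_map] using ht
  obtain ⟨i, hi, he⟩ := pvNS_mem s ((pvNS s)[t]'htn) (List.getElem_mem htn)
  have hlen : ((pvNS s)[t]'htn).toList.length = s.toList.length - i := by
    rw [he, pvToList_slice_from, List.length_drop]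
  have hq : (pvQ s)[t] = i := by
    simp only [pvQ, List.getElem_map, hlen]
    omega
  refine ⟨?_, Or.inl (by rw [hq]; exact hi)⟩
  rw [hq, he, pvToList_slice_from]

theorem pvQ_perm (s : String) : (pvQ s).Perm (List.range s.toList.length) := by
  have h1 : (pvQ s).Perm (((List.range s.toList.length).map
      (fun (i : Nat) => PySem.Str.slice s (some (i:Int)) none)).map
        (fun t => s.toList.length - t.toList.length)) := by
    exact (pvNS_perm s).map _
  refine h1.trans ?_
  rw [List.map_map]
  have : ∀ i ∈ List.range s.toList.length,
      ((fun t => s.toList.length - t.toList.length) ∘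
        (fun (i : Nat) => PySem.Str.slice s (some (i:Int)) none)) i = i := by
    intro i hi
    simp only [List.mem_range] at hi
    simp only [Function.comp_apply, pvToList_slice_from, List.length_drop]
    omega
  rw [List.map_congr_left this]
  simp

theorem pvQ_nodup (s : String) : (pvQ s).Nodup :=
  ((pvQ_perm s).nodup_iff).mpr (List.nodup_range)

theorem pvQ_lt (s : String) (t : Nat) (ht : t < (pvQ s).length) :
    (pvQ s)[t] < s.toList.length := by
  have : (pvQ s)[t] ∈ List.range s.toList.length :=
    (pvQ_perm s).mem_iff.mp (List.getElem_mem ht)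
  simpa using this

theorem pvRk_getElem (s : String) (t : Nat) (ht : t < (pvQ s).length) :
    pvRk s ((pvQ s)[t]) = t :=
  (pvQ_nodup s).idxOf_getElem t ht

theorem pvRk_lt (s : String) (i : Nat) (hi : i < s.toList.length) :
    pvRk s i < (pvQ s).length ∧ (pvQ s)[pvRk s i]'(by
      exact List.idxOf_lt_length_of_mem ((pvQ_perm s).mem_iff.mpr (by simpa using hi))) = i := by
  have hm : i ∈ pvQ s := (pvQ_perm s).mem_iff.mpr (by simpa using hi)
  exact ⟨List.idxOf_lt_length_of_mem hm, List.getElem_idxOf _⟩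
-- ===== suffix-array characterization =====
theorem pvInsertBy_congr {α : Type} (f g : α → α → Bool) (x : α) (ys : List α)
    (h : ∀ y ∈ ys, f x y = g x y) :
    PySem.List.insertBy f x ys = PySem.List.insertBy g x ys := by
  induction ys with
  | nil => rfl
  | cons y ys ih =>
    simp only [PySem.List.insertBy]
    rw [h y (by simp)]
    by_cases hc : g x y = true
    · simp [hc]
    · simp only [Bool.not_eq_true] at hc
      simp [hc]
      exact ih (fun z hz => h z (by simp [hz]))

theorem pvFoldlInsertBy_congr {α : Type} (f g : α → α → Bool) (xs acc : List α)
    (h : ∀ a b, a ∈ xs → (b ∈ xs ∨ b ∈ acc) → f a b = g a b) :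
    xs.foldl (fun acc x => PySem.List.insertBy f x acc) acc =
      xs.foldl (fun acc x => PySem.List.insertBy g x acc) acc := by
  induction xs generalizing acc with
  | nil => rfl
  | cons x xs ih =>
    simp only [List.foldl_cons]
    rw [pvInsertBy_congr f g x acc (fun y hy => h x y (by simp) (Or.inr hy))]
    exact ih (PySem.List.insertBy g x acc) (fun a b ha hb => by
      refine h a b (by simp [ha]) ?_
      rcases hb with hb | hb
      · exact Or.inl (by simp [hb])
      · rcases (PySem.List.mem_insertBy g x b acc).mp hb with rfl | hb
        · exact Or.inl (by simp)
        · exact Or.inr hb)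

theorem pvSortedPairs_eq (s : String) :
    PySem.List.sorted2
      ((PySem.List.pyRange 0 (PySem.Str.len s) 1).map
        (fun i => (PySem.Str.slice s (some i) none, i))) (fun p => p.1) (fun p => p.2) =
      (pvNS s).map (fun t => (t, ((s.toList.length - t.toList.length : Nat) : Int))) := by
  have hU : (PySem.List.pyRange 0 (PySem.Str.len s) 1).map
      (fun i => (PySem.Str.slice s (some i) none, i)) =
      (List.range s.toList.length).map
        (fun (k : Nat) => (PySem.Str.slice s (some (k:Int)) none, (k : Int))) := by
    rw [PySem.Str.len_eq, PySem.List.pyRange_zero_nat, List.map_map]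
    rfl
  rw [hU]
  -- first: sorted2 on these pairs equals sorted by first component (all firsts distinct)
  have h2 : PySem.List.sorted2
      ((List.range s.toList.length).map
        (fun (k : Nat) => (PySem.Str.slice s (some (k:Int)) none, (k : Int))))
      (fun p => p.1) (fun p => p.2) =
      PySem.List.sorted
        ((List.range s.toList.length).map
          (fun (k : Nat) => (PySem.Str.slice s (some (k:Int)) none, (k : Int))))
        (fun p => p.1) := by
    show List.foldl (fun acc x => PySem.List.insertBy
        (fun a b => decide (a.1 < b.1) || (!decide (b.1 < a.1) && decide (a.2 < b.2))) x acc) []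
        ((List.range s.toList.length).map
          (fun (k : Nat) => (PySem.Str.slice s (some (k:Int)) none, (k : Int)))) = _
    rw [PySem.List.sorted_eq_foldl_insertBy]
    apply pvFoldlInsertBy_congr
    intro a b ha hb
    simp only [List.mem_map, List.mem_range] at ha hb
    obtain ⟨i, hi, rfl⟩ := ha
    rcases hb with ⟨j, hj, rfl⟩ | hb
    · by_cases hij : i = j
      · subst hij; simp
      · have hne : PySem.Str.slice s (some (i:Int)) none ≠ PySem.Str.slice s (some (j:Int)) none := by
          intro heq
          have := congrArg (fun t => t.toList.length) heq
          simp only [pvToList_slice_from, List.length_drop] at this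
          omega
        rcases lt_or_gt_of_ne hne with hlt | hgt
        · simp [hlt, asymm hlt]
        · simp [hgt, asymm hgt]
    · exact absurd hb (List.not_mem_nil)
  rw [h2]
  -- then: name the sorted order
  apply PySem.List.sorted_eq_of_perm_of_pairwise_lt
  · refine ((pvNS_perm s).map _).trans ?_
    rw [List.map_map]
    apply List.Perm.of_eq
    apply List.map_congr_left
    intro i hi
    simp only [List.mem_range] at hi
    simp only [Function.comp_apply, pvToList_slice_from, List.length_drop]
    congr 2
    omega
  · rw [List.pairwise_map]
    exact pvNS_pairwise_lt s

theorem pvSuffixArray_eq (s : String) :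
    pvSuffixArray s = (pvQ s).map (fun (p : Nat) => (p : Int)) := by
  show (PySem.List.sorted2
      ((PySem.List.pyRange 0 (PySem.Str.len s) 1).map
        (fun i => (PySem.Str.slice s (some i) none, i)))
      (fun p => p.1) (fun p => p.2)).map (fun p => p.2) = _
  rw [pvSortedPairs_eq, List.map_map, pvQ, List.map_map]
  rfl
-- ===== rank-array characterization =====
def pvBuildRank (qs : List Nat) (r0 : List Int) (s : Int) : List Int :=
  (PySem.List.enumerate (qs.map (fun (p : Nat) => (p : Int))) s).foldl
    (fun r p => PySem.List.pySetD r p.2 p.1) r0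

theorem pvBuildRank_cons (q : Nat) (qs : List Nat) (r0 : List Int) (s : Int) :
    pvBuildRank (q :: qs) r0 s = pvBuildRank qs (r0.set q s) (s + 1) := by
  unfold pvBuildRank
  rw [List.map_cons, PySem.List.enumerate_cons, List.foldl_cons, PySem.List.pySetD_natCast]

theorem pvBuildRank_notMem (qs : List Nat) (r0 : List Int) (s : Int) (q : Nat)
    (hq : q ∉ qs) : (pvBuildRank qs r0 s).getD q 0 = r0.getD q 0 := by
  induction qs generalizing r0 s with
  | nil => rfl
  | cons q' qs ih =>
    rw [pvBuildRank_cons, ih _ _ (fun h => hq (by simp [h]))]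
    have hne : q' ≠ q := fun h => hq (by simp [h])
    simp [List.getD, List.getElem?_set_ne hne]

theorem pvBuildRank_getD (qs : List Nat) (r0 : List Int) (s : Int)
    (hnd : qs.Nodup) (t : Nat) (ht : t < qs.length) (hlt : qs[t] < r0.length) :
    (pvBuildRank qs r0 s).getD (qs[t]) 0 = s + t := by
  induction qs generalizing r0 s t with
  | nil => simp at ht
  | cons q qs ih =>
    rw [pvBuildRank_cons]
    cases t with
    | zero =>
      simp only [List.getElem_cons_zero]
      rw [pvBuildRank_notMem qs _ _ q (by simp at hnd; exact hnd.1)]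
      simp only [List.getElem_cons_zero] at hlt
      simp [List.getD, hlt]
    | succ t =>
      simp only [List.getElem_cons_succ]
      rw [ih _ _ (by simp at hnd; exact hnd.2) t (by simpa using ht)
        (by simpa using hlt)]
      omega
-- ===== while-loop (pvLcpExtend) correctness =====
theorem pvLcpExtend_eq (l : List Char) (i j k : Nat)
    (hk : k ≤ pvCpl (l.drop i) (l.drop j)) :
    pvLcpExtend l i j k = pvCpl (l.drop i) (l.drop j) := by
  generalize hm : pvCpl (l.drop i) (l.drop j) - k = m at *
  induction m generalizing k with
  | zero =>
    have hke : k = pvCpl (l.drop i) (l.drop j) := by omega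
    rw [pvLcpExtend, dif_neg, hke]
    intro ⟨h1, h2, h3⟩
    have : k < pvCpl (l.drop i) (l.drop j) := by
      refine pvCpl_lt_of _ _ k ' ' hk ?_ ?_ ?_
      · rw [List.length_drop]; omega
      · rw [List.length_drop]; omega
      · rw [pvGetD_drop, pvGetD_drop]; exact h3
    omega
  | succ m ih =>
    have hklt : k < pvCpl (l.drop i) (l.drop j) := by omega
    have h1 : i + k < l.length := by
      have := pvCpl_le_left (l.drop i) (l.drop j)
      rw [List.length_drop] at this
      omega
    have h2 : j + k < l.length := by
      have := pvCpl_le_right (l.drop i) (l.drop j)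
      rw [List.length_drop] at this
      omega
    have h3 : l.getD (i+k) ' ' = l.getD (j+k) ' ' := by
      rw [← pvGetD_drop, ← pvGetD_drop]
      exact pvCp_getD_eq _ _ k ' ' hklt
    rw [pvLcpExtend, dif_pos ⟨h1, h2, h3⟩]
    exact ih (k+1) (by omega) (by omega)
-- ===== Kasai's invariant: lcp of text-adjacent suffixes drops by at most 1 =====
theorem pvCpl_nil_right (a : List Char) : pvCpl a [] = 0 := by
  simp [pvCpl, pvCommonPrefixChars]

theorem pvNS_getElem_lt (s : String) (t u : Nat) (htu : t < u) (hu : u < (pvNS s).length) :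
    (pvNS s)[t]'(by omega) < (pvNS s)[u] :=
  (pvNS_pairwise_lt s).rel_get_of_lt htu

theorem pvDropQ (s : String) (t : Nat) (ht : t < s.toList.length) :
    s.toList.drop ((pvQ s).getD t 0) =
      ((pvNS s)[t]'(by rw [pvNS_length]; exact ht)).toList ∧ (pvQ s).getD t 0 < s.toList.length := by
  have ht' : t < (pvQ s).length := by rw [pvQ_length]; exact ht
  rw [List.getD_eq_getElem _ _ ht']
  obtain ⟨h1, h2⟩ := pvQ_getElem s t ht'
  exact ⟨h1, pvQ_lt s t ht'⟩

theorem pvRk_getD (s : String) (i : Nat) (hi : i < s.toList.length) :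
    (pvQ s).getD (pvRk s i) 0 = i := by
  obtain ⟨h1, h2⟩ := pvRk_lt s i hi
  rw [List.getD_eq_getElem _ _ h1]
  exact h2

theorem pvRk_lt' (s : String) (i : Nat) (hi : i < s.toList.length) :
    pvRk s i < s.toList.length := by
  have := (pvRk_lt s i hi).1
  rwa [pvQ_length] at this

theorem pvKasai (s : String) (m : Nat) (hm1 : m + 1 < s.toList.length)
    (ha : pvRk s m + 1 < s.toList.length) (hb : pvRk s (m+1) + 1 < s.toList.length) :
    pvCpl (s.toList.drop m) (s.toList.drop ((pvQ s).getD (pvRk s m + 1) 0)) ≤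
      pvCpl (s.toList.drop (m+1)) (s.toList.drop ((pvQ s).getD (pvRk s (m+1) + 1) 0)) + 1 := by
  set l := s.toList with hl
  set n := l.length with hn
  have hQlen : (pvQ s).length = n := pvQ_length s
  have hNlen : (pvNS s).length = n := pvNS_length s
  have hmn : m < n := by omega
  -- the suffix following suffix m in sorted order starts at j
  set j := (pvQ s).getD (pvRk s m + 1) 0 with hj
  obtain ⟨hdj, hjn⟩ := pvDropQ s (pvRk s m + 1) ha
  set h := pvCpl (l.drop m) (l.drop j) with hh
  rcases Nat.eq_zero_or_pos h with h0 | hpos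
  · omega
  -- the heads of suffix m and suffix j agree
  have hhead : l[m]'hmn = l[j]'hjn := by
    have := pvCp_getD_eq (l.drop m) (l.drop j) 0 ' ' hpos
    rw [pvGetD_drop, pvGetD_drop] at this
    rwa [List.getD_eq_getElem _ _ (by omega : m + 0 < l.length),
      List.getD_eq_getElem _ _ (by omega : j + 0 < l.length)] at this
  have hdm : l.drop m = l[m] :: l.drop (m+1) := List.drop_eq_getElem_cons hmn
  have hdj2 : l.drop j = l[j] :: l.drop (j+1) := List.drop_eq_getElem_cons hjn
  have hstep : h = pvCpl (l.drop (m+1)) (l.drop (j+1)) + 1 := by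
    rw [hh, hdm, hdj2, ← hhead, pvCpl_cons, if_pos rfl]
  rcases Nat.lt_or_ge (j+1) n with hj1 | hj1
  swap
  · -- suffix j is the last character of the string: h = 1
    have : l.drop (j+1) = [] := by
      apply List.drop_eq_nil_of_le
      omega
    rw [this, pvCpl_nil_right] at hstep
    omega
  -- j+1 < n: sandwich the successor of suffix m+1 between suffix m+1 and suffix j+1
  have hrm1 : pvRk s (m+1) < n := pvRk_lt' s (m+1) hm1
  have hrj1 : pvRk s (j+1) < n := pvRk_lt' s (j+1) hj1
  have hrm : pvRk s m < n := pvRk_lt' s m (by omega)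
  obtain ⟨hy, hyn⟩ := pvDropQ s (pvRk s (m+1) + 1) hb
  -- drop m = NS[rk m], drop (m+1) = NS[rk (m+1)], drop (j+1) = NS[rk (j+1)]
  have hdm' : l.drop m = ((pvNS s)[pvRk s m]'(by omega)).toList := by
    have := (pvDropQ s (pvRk s m) hrm).1
    rwa [pvRk_getD s m (by omega)] at this
  have hdm1' : l.drop (m+1) = ((pvNS s)[pvRk s (m+1)]'(by omega)).toList := by
    have := (pvDropQ s (pvRk s (m+1)) hrm1).1
    rwa [pvRk_getD s (m+1) hm1] at this
  have hdj1' : l.drop (j+1) = ((pvNS s)[pvRk s (j+1)]'(by omega)).toList := by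
    have := (pvDropQ s (pvRk s (j+1)) hrj1).1
    rwa [pvRk_getD s (j+1) hj1] at this
  -- strict order of the two tails
  have hmltj : l.drop m < l.drop j := by
    rw [hdm', hdj]
    exact String.lt_iff_toList_lt.mp
      (pvNS_getElem_lt s (pvRk s m) (pvRk s m + 1) (by omega) (by omega))
  have htails : l.drop (m+1) < l.drop (j+1) := by
    rw [hdm, hdj2, ← hhead] at hmltj
    rcases List.cons_lt_cons_iff.mp hmltj with hc | ⟨-, hc⟩
    · exact absurd hc (lt_irrefl _)
    · exact hc
  have htailsNS : ((pvNS s)[pvRk s (m+1)]'(by omega)).toList <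
      ((pvNS s)[pvRk s (j+1)]'(by omega)).toList := by
    rw [← hdm1', ← hdj1']
    exact htails
  -- rk (m+1) < rk (j+1)
  have hpos' : pvRk s (m+1) < pvRk s (j+1) := by
    rcases Nat.lt_trichotomy (pvRk s (m+1)) (pvRk s (j+1)) with h' | h' | h'
    · exact h'
    · exfalso
      simp only [h'] at htailsNS
      exact lt_irrefl _ htailsNS
    · exfalso
      have := String.lt_iff_toList_lt.mp
        (pvNS_getElem_lt s (pvRk s (j+1)) (pvRk s (m+1)) h' (by omega))
      exact absurd htailsNS (asymm this)
  -- the successor of suffix m+1 lies between them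
  have h1 : l.drop (m+1) ≤ l.drop ((pvQ s).getD (pvRk s (m+1) + 1) 0) := by
    rw [hdm1', hy]
    exact le_of_lt (String.lt_iff_toList_lt.mp
      (pvNS_getElem_lt s (pvRk s (m+1)) (pvRk s (m+1) + 1) (by omega) (by omega)))
  have h2 : l.drop ((pvQ s).getD (pvRk s (m+1) + 1) 0) ≤ l.drop (j+1) := by
    rw [hy, hdj1']
    rcases Nat.lt_or_ge (pvRk s (m+1) + 1) (pvRk s (j+1)) with hlt | hge
    · exact String.le_iff_toList_le.mp (le_of_lt
        (pvNS_getElem_lt s _ _ hlt (by omega)))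
    · have heq : pvRk s (m+1) + 1 = pvRk s (j+1) := by omega
      simp [heq]
  have := pvSandwichCpl (l.drop (m+1)) (l.drop ((pvQ s).getD (pvRk s (m+1) + 1) 0))
    (l.drop (j+1)) h1 h2
  omega
-- ===== the Kasai loop of lcp_array =====
-- lcp value of the adjacent sorted pair at rank position t
def pvT (s : String) (t : Nat) : Nat :=
  pvCpl (s.toList.drop ((pvQ s).getD t 0)) (s.toList.drop ((pvQ s).getD (t+1) 0))

-- the loop body of lcp_array, with rank and suffix_array in their characterized forms
def pvBody (s : String) (st : List Int × Nat) (i : Nat) : List Int × Nat :=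
  let n := s.toList.length
  let rank := pvBuildRank (pvQ s) (List.replicate n 0) 0
  let sa := (pvQ s).map (fun (p : Nat) => (p : Int))
  if PySem.List.pyGetD rank (i : Int) 0 = (n : Int) - 1 then (st.1, 0)
  else
    let j := PySem.List.pyGetD sa (PySem.List.pyGetD rank (i : Int) 0 + 1) 0
    let k := pvLcpExtend s.toList i j.toNat st.2
    (PySem.List.pySetD st.1 (PySem.List.pyGetD rank (i : Int) 0) (k : Int),
     if k > 0 then k - 1 else k)

theorem pvRank_getD (s : String) (i : Nat) (hi : i < s.toList.length) :
    PySem.List.pyGetD (pvBuildRank (pvQ s) (List.replicate s.toList.length 0) 0) (i : Int) 0 =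
      ((pvRk s i : Nat) : Int) := by
  rw [PySem.List.pyGetD_natCast]
  obtain ⟨h1, -⟩ := pvRk_lt s i hi
  have h2 : (pvQ s).getD (pvRk s i) 0 = i := pvRk_getD s i hi
  have h4 : (pvQ s)[pvRk s i]'h1 = i := by
    rw [← List.getD_eq_getElem _ _ h1]
    exact h2
  have h3 := pvBuildRank_getD (pvQ s) (List.replicate s.toList.length 0) 0 (pvQ_nodup s)
    (pvRk s i) h1 (by simpa using pvQ_lt s (pvRk s i) h1)
  rw [h4] at h3
  rw [h3]
  omega

theorem pvSa_getD (s : String) (u : Nat) (hu : u < s.toList.length) :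
    PySem.List.pyGetD ((pvQ s).map (fun (p : Nat) => (p : Int))) (u : Int) 0 =
      (((pvQ s).getD u 0 : Nat) : Int) := by
  rw [PySem.List.pyGetD_natCast]
  have hu' : u < (pvQ s).length := by rw [pvQ_length]; exact hu
  rw [List.getD_eq_getElem _ _ (by simpa using hu'), List.getElem_map,
    List.getD_eq_getElem _ _ hu']

theorem pvQ_getD_eq_iff (s : String) (t : Nat) (ht : t < s.toList.length) (m : Nat)
    (hm : m < s.toList.length) : (pvQ s).getD t 0 = m ↔ t = pvRk s m := by
  have ht' : t < (pvQ s).length := by rw [pvQ_length]; exact ht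
  rw [List.getD_eq_getElem _ _ ht']
  constructor
  · intro h
    have := pvRk_getElem s t ht'
    rw [h] at this
    exact this.symm
  · intro h
    subst h
    exact (pvRk_lt s m hm).2

theorem pvLoop_inv (s : String) (m : Nat) (hm : m ≤ s.toList.length) :
    ((List.range m).foldl (pvBody s) (List.replicate s.toList.length 0, 0)).1.length
        = s.toList.length ∧
    (∀ t, t < s.toList.length →
      ((List.range m).foldl (pvBody s) (List.replicate s.toList.length 0, 0)).1.getD t 0 =
        if (pvQ s).getD t 0 < m ∧ t + 1 < s.toList.length then ((pvT s t : Nat) : Int) else 0) ∧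
    (m < s.toList.length → pvRk s m + 1 < s.toList.length →
      ((List.range m).foldl (pvBody s) (List.replicate s.toList.length 0, 0)).2
        ≤ pvT s (pvRk s m)) := by
  set n := s.toList.length with hn
  induction m with
  | zero =>
    refine ⟨by simp, fun t ht => by simp, fun h1 h2 => by simp⟩
  | succ m ih =>
    have hmn : m < n := by omega
    obtain ⟨ih1, ih2, ih3⟩ := ih (by omega)
    rw [List.range_succ, List.foldl_append, List.foldl_cons, List.foldl_nil]
    set st := (List.range m).foldl (pvBody s) (List.replicate n 0, 0) with hst
    have hrkm : pvRk s m < n := pvRk_lt' s m hmn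
    show (pvBody s st m).1.length = n ∧ _ ∧ _
    by_cases hlast : pvRk s m = n - 1
    · -- rank[m] == n-1 : k is reset, lcp unchanged
      have htest : PySem.List.pyGetD (pvBuildRank (pvQ s) (List.replicate n 0) 0) (m : Int) 0
          = (n : Int) - 1 := by
        rw [pvRank_getD s m hmn, hlast]
        omega
      have hbody : pvBody s st m = (st.1, 0) := by
        unfold pvBody
        rw [if_pos htest]
      rw [hbody]
      refine ⟨ih1, fun t ht => ?_, fun h1 h2 => by simp⟩
      rw [ih2 t ht]
      by_cases hQt : (pvQ s).getD t 0 = m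
      · have : t = pvRk s m := (pvQ_getD_eq_iff s t ht m hmn).mp hQt
        have htn1 : ¬ (t + 1 < n) := by omega
        simp [htn1]
      · have : ((pvQ s).getD t 0 < m + 1 ∧ t + 1 < n) ↔ ((pvQ s).getD t 0 < m ∧ t + 1 < n) := by
          omega
        rw [if_congr this rfl rfl]
    · -- general step: extend k, write lcp[rank[m]]
      have hrk1 : pvRk s m + 1 < n := by omega
      have htest : ¬ (PySem.List.pyGetD (pvBuildRank (pvQ s) (List.replicate n 0) 0) (m : Int) 0
          = (n : Int) - 1) := by
        rw [pvRank_getD s m hmn]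
        intro hc
        omega
      have hcast : (((pvRk s m : Nat) : Int) + 1) = ((pvRk s m + 1 : Nat) : Int) := by push_cast; ring
      have hj2 : PySem.List.pyGetD ((pvQ s).map (fun (p : Nat) => (p : Int)))
          (((pvRk s m : Nat) : Int) + 1) 0
          = (((pvQ s).getD (pvRk s m + 1) 0 : Nat) : Int) := by
        rw [hcast, pvSa_getD s (pvRk s m + 1) hrk1]
      have hT : pvT s (pvRk s m) =
          pvCpl (s.toList.drop m) (s.toList.drop ((pvQ s).getD (pvRk s m + 1) 0)) := by
        unfold pvT
        rw [pvRk_getD s m hmn]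
      have hk : pvLcpExtend s.toList m ((((pvQ s).getD (pvRk s m + 1) 0 : Nat) : Int)).toNat st.2
          = pvT s (pvRk s m) := by
        rw [Int.toNat_natCast, hT]
        exact pvLcpExtend_eq s.toList m _ st.2 (by rw [← hT]; exact ih3 hmn hrk1)
      have hbody : pvBody s st m =
          (st.1.set (pvRk s m) ((pvT s (pvRk s m) : Nat) : Int),
           if pvT s (pvRk s m) > 0 then pvT s (pvRk s m) - 1 else pvT s (pvRk s m)) := by
        unfold pvBody
        rw [if_neg htest]
        simp only [pvRank_getD s m hmn, hj2, hk, PySem.List.pySetD_natCast]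
      rw [hbody]
      refine ⟨by rw [List.length_set]; exact ih1, fun t ht => ?_, fun h1 h2 => ?_⟩
      · by_cases hQt : (pvQ s).getD t 0 = m
        · have hteq : t = pvRk s m := (pvQ_getD_eq_iff s t ht m hmn).mp hQt
          rw [hteq]
          rw [List.getD_eq_getElem _ _ (by rw [List.length_set]; omega),
            List.getElem_set_self (by rw [List.length_set]; omega)]
          have hc : (pvQ s).getD t 0 < m + 1 ∧ t + 1 < n := ⟨by omega, by omega⟩
          rw [← hteq, if_pos hc]
        · have hne : pvRk s m ≠ t := fun hc =>
            hQt ((pvQ_getD_eq_iff s t ht m hmn).mpr hc.symm)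
          have : (st.1.set (pvRk s m) ((pvT s (pvRk s m) : Nat) : Int)).getD t 0 = st.1.getD t 0 := by
            simp [List.getD, List.getElem?_set_ne hne]
          rw [this, ih2 t ht]
          have hiff : ((pvQ s).getD t 0 < m + 1 ∧ t + 1 < n) ↔ ((pvQ s).getD t 0 < m ∧ t + 1 < n) := by
            omega
          rw [if_congr hiff rfl rfl]
      · -- carried k for the next iteration, via Kasai's inequality
        have hkasai := pvKasai s m h1 hrk1 h2
        have hT1 : pvT s (pvRk s (m+1)) =
            pvCpl (s.toList.drop (m+1)) (s.toList.drop ((pvQ s).getD (pvRk s (m+1) + 1) 0)) := by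
          unfold pvT
          rw [pvRk_getD s (m+1) h1]
        rw [← hT, ← hT1] at hkasai
        by_cases hpos : pvT s (pvRk s m) > 0
        · rw [if_pos hpos]
          omega
        · rw [if_neg hpos]
          omega

theorem pvLcpArray_eq (s : String) :
    pvLcpArray s (pvSuffixArray s) =
      (List.range s.toList.length).map
        (fun t => if t + 1 < s.toList.length then ((pvT s t : Nat) : Int) else 0) := by
  rw [pvSuffixArray_eq]
  have hfold : pvLcpArray s ((pvQ s).map (fun (p : Nat) => (p : Int))) =
      ((List.range s.toList.length).foldl (pvBody s)
        (List.replicate s.toList.length 0, 0)).1 := rfl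
  rw [hfold]
  obtain ⟨h1, h2, -⟩ := pvLoop_inv s s.toList.length le_rfl
  apply List.ext_getElem
  · rw [h1, List.length_map, List.length_range]
  · intro t ht1 ht2
    have htn : t < s.toList.length := by rwa [h1] at ht1
    have := h2 t htn
    rw [List.getD_eq_getElem _ _ ht1] at this
    rw [this, List.getElem_map, List.getElem_range]
    have hQlt : (pvQ s).getD t 0 < s.toList.length := by
      have ht' : t < (pvQ s).length := by rw [pvQ_length]; exact htn
      rw [List.getD_eq_getElem _ _ ht']
      exact pvQ_lt s t ht'
    have hiff : ((pvQ s).getD t 0 < s.toList.length ∧ t + 1 < s.toList.length)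
        ↔ (t + 1 < s.toList.length) := by
      constructor
      · exact fun h => h.2
      · exact fun h => ⟨hQlt, h⟩
    rw [if_congr hiff rfl rfl]
-- ===== assembling both outputs =====
theorem pvEnumerate_append {α : Type} (xs ys : List α) (s : Int) :
    PySem.List.enumerate (xs ++ ys) s =
      PySem.List.enumerate xs s ++ PySem.List.enumerate ys (s + xs.length) := by
  induction xs generalizing s with
  | nil => simp [PySem.List.enumerate]
  | cons x xs ih =>
    have harg : s + 1 + (xs.length : Int) = s + ((x :: xs).length : Int) := by
      simp only [List.length_cons]
      push_cast
      omega
    rw [List.cons_append, PySem.List.enumerate_cons, ih, PySem.List.enumerate_cons, harg,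
      List.cons_append]

theorem pvEnumerate_map_range {α : Type} (f : Nat → α) (n : Nat) (s : Int) :
    PySem.List.enumerate ((List.range n).map f) s =
      (List.range n).map (fun (t : Nat) => ((s + t : Int), f t)) := by
  induction n with
  | zero => simp
  | succ n ih =>
    rw [List.range_succ, List.map_append, List.map_append, pvEnumerate_append, ih]
    simp [PySem.List.enumerate_cons, PySem.List.enumerate]

theorem pvNS_zip_tail (s : String) :
    (pvNS s).zip ((pvNS s).tail) = (List.range (s.toList.length - 1)).map
      (fun t => ((pvNS s).getD t "", (pvNS s).getD (t+1) "")) := by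
  have hNlen : (pvNS s).length = s.toList.length := pvNS_length s
  apply List.ext_getElem
  · simp only [List.length_zip, List.length_tail, List.length_map, List.length_range, hNlen]
    omega
  · intro t h1 h2
    simp only [List.length_zip, List.length_tail, hNlen] at h1
    rw [List.getElem_zip, List.getElem_map, List.getElem_range,
      List.getElem_tail, List.getD_eq_getElem _ _ (by omega),
      List.getD_eq_getElem _ _ (by omega)]

theorem pvPt (s : String) (t : Nat) (ht : t < s.toList.length - 1) :
    pvCommonPrefix ((pvNS s).getD t "") ((pvNS s).getD (t+1) "") =
      String.ofList ((s.toList.drop ((pvQ s).getD t 0)).take (pvT s t)) ∧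
    ((s.toList.drop ((pvQ s).getD t 0)).take (pvT s t)).length = pvT s t := by
  have hNlen : (pvNS s).length = s.toList.length := pvNS_length s
  have h1 : (pvNS s).getD t "" = (pvNS s)[t]'(by rw [hNlen]; omega) :=
    List.getD_eq_getElem _ _ (by rw [hNlen]; omega)
  have h2 : (pvNS s).getD (t+1) "" = (pvNS s)[t+1]'(by rw [hNlen]; omega) :=
    List.getD_eq_getElem _ _ (by rw [hNlen]; omega)
  have hd1 := (pvDropQ s t (by omega)).1
  have hd2 := (pvDropQ s (t+1) (by omega)).1
  have hcpl : pvT s t = pvCpl (s.toList.drop ((pvQ s).getD t 0))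
      (s.toList.drop ((pvQ s).getD (t+1) 0)) := rfl
  constructor
  · unfold pvCommonPrefix
    exact congrArg String.ofList (by rw [h1, h2, ← hd1, ← hd2, pvCp_eq_take, hcpl])
  · rw [List.length_take]
    have := pvCpl_le_left (s.toList.drop ((pvQ s).getD t 0))
      (s.toList.drop ((pvQ s).getD (t+1) 0))
    rw [← hcpl] at this
    omega

set_option maxHeartbeats 1600000 in
theorem pvMain (s : String) :
    find_all_repeating_patterns s = find_all_repeating_patterns_alt s := by
  have hNlen : (pvNS s).length = s.toList.length := pvNS_length s
  have hB : find_all_repeating_patterns_alt s =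
      ((((pvNS s).zip ((pvNS s).tail)).map (fun p => pvCommonPrefix p.1 p.2)).filter
        (fun p => decide (p ≠ ""))) := by
    show (((pvNS s).zip (PySem.List.slice (pvNS s) (some 1) none)).map _).filter _ = _
    rw [PySem.List.slice_from_one]
  have hA : find_all_repeating_patterns s =
      (PySem.List.enumerate
        ((List.range s.toList.length).map
          (fun t => if t + 1 < s.toList.length then ((pvT s t : Nat) : Int) else 0)) 0).foldl
        (fun patterns p =>
          if p.2 > 0 then
            patterns ++ [PySem.Str.slice s
              (some (PySem.List.pyGetD (pvSuffixArray s) p.1 0))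
              (some (PySem.List.pyGetD (pvSuffixArray s) p.1 0 + p.2))]
          else patterns) [] := by
    show (PySem.List.enumerate (pvLcpArray s (pvSuffixArray s)) 0).foldl _ [] = _
    rw [pvLcpArray_eq]
  rw [hA, hB, pvEnumerate_map_range]
  have hif : (fun (patterns : List String) (p : Int × Int) =>
      if p.2 > 0 then
        patterns ++ [PySem.Str.slice s
          (some (PySem.List.pyGetD (pvSuffixArray s) p.1 0))
          (some (PySem.List.pyGetD (pvSuffixArray s) p.1 0 + p.2))]
      else patterns) =
      (fun (patterns : List String) (p : Int × Int) =>
        if (decide (p.2 > 0)) = true then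
          patterns ++ [PySem.Str.slice s
            (some (PySem.List.pyGetD (pvSuffixArray s) p.1 0))
            (some (PySem.List.pyGetD (pvSuffixArray s) p.1 0 + p.2))]
        else patterns) := by
    funext patterns p
    simp only [decide_eq_true_eq]
  rw [hif, PySem.List.foldl_append_if, List.nil_append, List.filter_map, List.map_map,
    pvNS_zip_tail, List.map_map, List.filter_map]
  clear hA hB hif
  -- drop the last rank position from the A side: its lcp entry is 0
  rcases Nat.eq_zero_or_pos s.toList.length with hn0 | hnpos
  · rw [hn0]
    simp
  have hsplit : List.range s.toList.length =
      List.range (s.toList.length - 1) ++ [s.toList.length - 1] := by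
    conv_lhs => rw [show s.toList.length = (s.toList.length - 1) + 1 by omega]
    rw [List.range_succ]
  rw [hsplit, List.filter_append]
  have hlast : List.filter
      ((fun p => decide (p.2 > 0)) ∘ (fun (t : Nat) => ((0 : Int) + (t : Int),
        if t + 1 < s.toList.length then ((pvT s t : Nat) : Int) else 0)))
      [s.toList.length - 1] = [] := by
    have hc : ¬ (s.toList.length - 1 + 1 < s.toList.length) := by omega
    simp only [Function.comp_apply, List.filter_cons, List.filter_nil]
    rw [if_neg hc]
    simp
  rw [hlast, List.append_nil]
  -- now both sides are filter-then-map over range (n-1); compare pointwise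
  have hfilter : ∀ t ∈ List.range (s.toList.length - 1),
      ((fun p => decide (p.2 > 0)) ∘ (fun (t : Nat) => ((0 : Int) + (t : Int),
        if t + 1 < s.toList.length then ((pvT s t : Nat) : Int) else 0))) t =
      ((fun p => decide (p ≠ "")) ∘ ((fun p => pvCommonPrefix p.1 p.2) ∘
        (fun t => ((pvNS s).getD t "", (pvNS s).getD (t+1) "")))) t := by
    intro t ht
    simp only [List.mem_range] at ht
    obtain ⟨hcp, hlen⟩ := pvPt s t ht
    simp only [Function.comp_apply, hcp]
    rw [if_pos (by omega : t + 1 < s.toList.length)]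
    rw [decide_eq_decide]
    constructor
    · intro h hc
      have := congrArg (fun u => u.toList.length) hc
      simp only [String.toList_ofList, hlen] at this
      simp at this
      omega
    · intro h
      by_contra hc
      apply h
      have hT0 : pvT s t = 0 := by omega
      apply String.toList_inj.mp
      simp [hT0]
  rw [List.filter_congr hfilter]
  apply List.map_congr_left
  intro t ht
  simp only [List.mem_filter, List.mem_range] at ht
  obtain ⟨ht, -⟩ := ht
  obtain ⟨hcp, hlen⟩ := pvPt s t ht
  simp only [Function.comp_apply, hcp]
  rw [if_pos (by omega : t + 1 < s.toList.length)]
  apply String.toList_inj.mp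
  rw [String.toList_ofList]
  have hsa : PySem.List.pyGetD (pvSuffixArray s) ((0 : Int) + (t : Int)) 0 =
      (((pvQ s).getD t 0 : Nat) : Int) := by
    rw [zero_add, pvSuffixArray_eq]
    exact pvSa_getD s t (by omega)
  rw [hsa]
  simp [pysem]

-- ===== VERDICT (by name: the statement is the Claim_ definition above) =====
theorem find_all_repeating_patterns_spec : Claim_equal_find_all_repeating_patterns := by
  intro string _
  exact pvMain string
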